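-- pv_equiv track=rewrite | github.com/alexsivan/DeepLearningPractice | Project/CWSNER/dataset.py | cws_transfer_to_trainable
-- ===== SOURCE A (Python) =====
-- from typing import List
--
-- def cws_transfer_to_trainable(raw_data_lines: List[str]):
--     """ Load labeled cws data into trainable format """
--
--     dataset_list = []
--
--     for raw_sentence in raw_data_lines:
--         sentence_list = []
--         for word in raw_sentence.split():
--             if len(word) == 1:  # single word
--                 label = 'S'
--                 sentence_list.append((word, label))
--             else:  # normal case
--                 for i, char in enumerate(word):
--                     if i == 0:
--                         label = 'B'
--                     elif i == len(word)-1: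
--                         label = 'E'
--                     else:
--                         label = 'M'
--                     sentence_list.append((char, label))
--
--         dataset_list.append(sentence_list)
--
--     return dataset_list
-- ===== SOURCE B (Python) =====
-- def cws_transfer_to_trainable(raw_data_lines):
--     """ Load labeled cws data into trainable format """
--     dataset_list = []
--     for raw_sentence in raw_data_lines:
--         sentence_list = []
--         prev_space = True
--         for ch, nxt in zip(raw_sentence, raw_sentence[1:] + ' '):
--             if not ch.isspace():
--                 next_space = nxt.isspace()
--                 if prev_space:
--                     label = 'S' if next_space else 'B'
--                 else:
--                     label = 'E' if next_space else 'M'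
--                 sentence_list.append((ch, label))
--             prev_space = ch.isspace()
--         dataset_list.append(sentence_list)
--     return dataset_list
-- ===== Notes on version B (the rewrite author's own statement) =====
-- stated objective: alternative
-- what changed: B never calls split(): it labels each sentence in one character-level scan, deriving each non-space character's BMES tag from its whitespace context (previous-char flag and one-character lookahead) instead of A's word list with per-index branching.
import Mathlib
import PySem

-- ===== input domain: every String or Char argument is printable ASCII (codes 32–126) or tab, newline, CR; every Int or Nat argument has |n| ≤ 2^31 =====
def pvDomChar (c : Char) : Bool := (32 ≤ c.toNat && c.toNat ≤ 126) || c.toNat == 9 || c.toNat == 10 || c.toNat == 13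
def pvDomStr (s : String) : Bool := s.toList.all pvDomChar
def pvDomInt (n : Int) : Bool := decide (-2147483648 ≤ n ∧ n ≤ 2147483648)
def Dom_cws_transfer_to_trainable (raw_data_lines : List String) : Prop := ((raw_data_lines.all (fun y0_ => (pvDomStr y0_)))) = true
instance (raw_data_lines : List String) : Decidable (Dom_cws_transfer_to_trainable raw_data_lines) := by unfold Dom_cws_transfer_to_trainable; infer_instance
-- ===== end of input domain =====

-- B drops split() entirely: one character-level scan labels each non-space character
-- from its whitespace context (previous-char flag plus one-character lookahead); objective: alternative.

-- ===== PORT A =====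
def cws_transfer_to_trainable (raw_data_lines : List String) : List (List (String × String)) :=
  raw_data_lines.foldl (fun dataset_list raw_sentence =>
    dataset_list ++
      [(PySem.Str.split₀ raw_sentence).foldl (fun sentence_list word =>
          if PySem.Str.len word == 1 then
            sentence_list ++ [(word, "S")]
          else
            (PySem.List.enumerate word.toList).foldl (fun sl ic =>
              let label := if ic.1 == 0 then "B"
                else if ic.1 == PySem.Str.len word - 1 then "E"
                else "M"
              sl ++ [(String.ofList [ic.2], label)]) sentence_list) []]) []

-- ===== PORT B =====
-- transliterates Source B: fold over zip(sentence, sentence[1:] + ' ') with state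
-- (sentence_list, prev_space); labels from prev/next whitespace context
def cws_transfer_to_trainable_alt (raw_data_lines : List String) : List (List (String × String)) :=
  raw_data_lines.foldl (fun dataset_list raw_sentence =>
    let cs := raw_sentence.toList
    let r := (cs.zip (cs.drop 1 ++ [' '])).foldl (fun st p =>
        if !(PySem.Chars.isspace p.1) then
          let next_space := PySem.Chars.isspace p.2
          let label := if st.2 then (if next_space then "S" else "B")
                       else (if next_space then "E" else "M")
          (st.1 ++ [(String.ofList [p.1], label)], PySem.Chars.isspace p.1)
        else (st.1, PySem.Chars.isspace p.1)) (([] : List (String × String)), true)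
    dataset_list ++ [r.1]) []

-- ===== PRECONDITION & SPEC =====
def Spec_cws_transfer_to_trainable (raw_data_lines : List String) (out : List (List (String × String))) : Prop := out = cws_transfer_to_trainable_alt raw_data_lines
instance (raw_data_lines : List String) (out : List (List (String × String))) : Decidable (Spec_cws_transfer_to_trainable raw_data_lines out) := by unfold Spec_cws_transfer_to_trainable; infer_instance

-- ===== CLAIM (what is proved, stated in full; the proofs are below) =====
def Claim_equal_cws_transfer_to_trainable : Prop := ∀ (raw_data_lines : List String), Dom_cws_transfer_to_trainable raw_data_lines → Spec_cws_transfer_to_trainable raw_data_lines (cws_transfer_to_trainable raw_data_lines)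

-- ===== LEMMAS AND PROOFS =====

-- mirror of PySem.Chars.split₀.go without the reversed accumulator
def pvWordsAux : List Char → List Char → List (List Char)
  | [], cur => if cur.isEmpty then [] else [cur.reverse]
  | c :: cs, cur =>
      if PySem.Chars.isspace c then
        (if cur.isEmpty then pvWordsAux cs [] else cur.reverse :: pvWordsAux cs [])
      else pvWordsAux cs (c :: cur)

-- per-word BMES labelling, carried by a "previous char was a boundary" flag
def pvLabW : Bool → List Char → List (String × String)
  | _, [] => []
  | prev, c :: rest =>
      (String.ofList [c],
        if prev then (if rest.isEmpty then "S" else "B")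
        else (if rest.isEmpty then "E" else "M")) :: pvLabW false rest

def pvNextSpace : List Char → Bool
  | [] => true
  | c :: _ => PySem.Chars.isspace c

-- recursive form of B's character scan
def pvScan : Bool → List Char → List (String × String)
  | _, [] => []
  | prev, c :: cs =>
      if PySem.Chars.isspace c then pvScan true cs
      else (String.ofList [c],
        if prev then (if pvNextSpace cs then "S" else "B")
        else (if pvNextSpace cs then "E" else "M")) :: pvScan false cs

def pvBmes (n : Nat) : List Char :=
  if n == 1 then ['S'] else 'B' :: (List.replicate (n - 2) 'M' ++ ['E'])

lemma flatMap_singleton_map {α β : Type} (l : List α) (f : α → β) :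
    l.flatMap (fun x => [f x]) = l.map f := by
  induction l with
  | nil => rfl
  | cons a t ih => simp [List.flatMap_cons, ih]

lemma pvBmes_length (n : Nat) (h : n ≠ 1) : (pvBmes n).length = 1 + ((n - 2) + 1) := by
  rw [pvBmes, if_neg (by simpa using h)]
  simp
  omega

lemma pvBmes_getElem (n k : Nat) (h : n ≠ 1) (hk : k < n) (hk' : k < (pvBmes n).length) :
    (pvBmes n)[k] = if k = 0 then 'B' else if k = n - 1 then 'E' else 'M' := by
  simp only [pvBmes, beq_iff_eq] at hk' ⊢
  rw [List.getElem_of_eq (if_neg h)]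
  rw [if_neg h] at hk'
  rcases k with _ | j
  · simp
  · simp only [List.getElem_cons_succ]
    have hj : j < n - 1 := by simp at hk'; omega
    by_cases hj2 : j < n - 2
    · rw [List.getElem_append_left (by simpa using hj2)]
      simp [List.getElem_replicate]
      omega
    · have hje : j = n - 2 := by omega
      rw [List.getElem_append_right (by simp; omega)]
      simp
      omega

-- per-word: A's branching step appended to the accumulator = accumulator ++ the zipped BMES pattern
lemma word_step (sl : List (String × String)) (word : String) :
    (if PySem.Str.len word == 1 then
        sl ++ [(word, "S")]
      else
        (PySem.List.enumerate word.toList).foldl (fun sl2 ic =>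
          let label := if ic.1 == 0 then "B"
            else if ic.1 == PySem.Str.len word - 1 then "E"
            else "M"
          sl2 ++ [(String.ofList [ic.2], label)]) sl)
    = sl ++ (word.toList.zip (pvBmes word.toList.length)).map
        (fun p => (String.ofList [p.1], String.ofList [p.2])) := by
  have hlen : PySem.Str.len word = (word.toList.length : Int) := PySem.Str.len_eq word
  by_cases h1 : word.toList.length = 1
  · obtain ⟨c, hc⟩ : ∃ c, word.toList = [c] := by
      cases hw : word.toList with
      | nil => simp [hw] at h1
      | cons a t => cases t with
        | nil => exact ⟨a, rfl⟩
        | cons b t' => simp [hw] at h1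
    rw [if_pos (by simp [h1])]
    have hw : word = String.ofList [c] := by rw [← hc, String.ofList_toList]
    rw [hc]
    simp [pvBmes, hw]
  · rw [if_neg (by simp; exact_mod_cast h1)]
    rw [PySem.List.foldl_append_eq_flatMap]
    congr 1
    rw [flatMap_singleton_map]
    apply List.ext_getElem
    · rw [List.length_map, List.length_map, PySem.List.length_enumerate, List.length_zip,
        pvBmes_length _ h1]
      omega
    · intro k hk hk'
      have hkn : k < word.toList.length := by
        rw [List.length_map, PySem.List.length_enumerate] at hk
        exact hk
      have hkb : k < (pvBmes word.toList.length).length := by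
        rw [pvBmes_length _ h1]; omega
      simp only [List.getElem_map, PySem.List.getElem_enumerate, List.getElem_zip]
      rw [pvBmes_getElem _ _ h1 hkn hkb]
      simp only [hlen]
      by_cases hk0 : k = 0
      · subst hk0
        norm_num
      · have e0 : ((0 : Int) + (k : Int) == 0) = false := by
          simp only [beq_eq_false_iff_ne, ne_eq]
          omega
        rw [e0]
        by_cases hke : k = word.toList.length - 1
        · have e1 : ((0 : Int) + (k : Int) == (word.toList.length : Int) - 1) = true := by
            simp only [beq_iff_eq]
            omega
          rw [e1]
          simp only [Bool.false_eq_true, if_false, if_true]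
          rw [if_neg hk0, if_pos hke]
        · have e1 : ((0 : Int) + (k : Int) == (word.toList.length : Int) - 1) = false := by
            simp only [beq_eq_false_iff_ne, ne_eq]
            omega
          rw [e1]
          simp only [Bool.false_eq_true, if_false]
          rw [if_neg hk0, if_neg hke]

-- the zipped BMES pattern (mid-word suffix form) = pvLabW false
lemma zip_mid_eq_labW (rest : List Char) (h : rest ≠ []) :
    (rest.zip (List.replicate (rest.length - 1) 'M' ++ ['E'])).map
        (fun p => (String.ofList [p.1], String.ofList [p.2])) = pvLabW false rest := by
  induction rest with
  | nil => simp at h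
  | cons d rest' ih =>
    cases rest' with
    | nil => simp [pvLabW]
    | cons e rest'' =>
      have : (d :: e :: rest'').length - 1 = (e :: rest'').length - 1 + 1 := by
        simp
      rw [this, List.replicate_succ]
      simp only [List.cons_append, List.zip_cons_cons, List.map_cons]
      rw [ih (by simp)]
      simp [pvLabW]

-- the zipped BMES pattern = pvLabW true
lemma zip_eq_labW (w : List Char) :
    (w.zip (pvBmes w.length)).map (fun p => (String.ofList [p.1], String.ofList [p.2]))
      = pvLabW true w := by
  cases w with
  | nil => simp [pvLabW]
  | cons c rest =>
    cases rest with
    | nil => simp [pvBmes, pvLabW]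
    | cons d rest' =>
      have hn : (c :: d :: rest').length ≠ 1 := by simp
      rw [pvBmes, if_neg (by simpa using hn)]
      have h2 : (c :: d :: rest').length - 2 = (d :: rest').length - 1 := by simp
      rw [h2]
      simp only [List.zip_cons_cons, List.map_cons]
      rw [zip_mid_eq_labW (d :: rest') (by simp)]
      simp [pvLabW]

-- split₀.go = pvWordsAux modulo the reversed accumulator
lemma go_eq_wordsAux (cs : List Char) : ∀ cur acc,
    PySem.Chars.split₀.go cs cur acc = acc.reverse ++ pvWordsAux cs cur := by
  induction cs with
  | nil =>
    intro cur acc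
    rw [PySem.Chars.split₀.go, pvWordsAux]
    by_cases h : cur.isEmpty <;> simp [h]
  | cons c cs ih =>
    intro cur acc
    rw [PySem.Chars.split₀.go, pvWordsAux]
    by_cases hs : PySem.Chars.isspace c
    · by_cases h : cur.isEmpty <;> simp [hs, h, ih]
    · simp [hs, ih]

lemma takeWhile_isEmpty_eq_nextSpace (cs : List Char) :
    (cs.takeWhile (fun c => !PySem.Chars.isspace c)).isEmpty = pvNextSpace cs := by
  cases cs with
  | nil => simp [pvNextSpace]
  | cons c cs =>
    by_cases h : PySem.Chars.isspace c <;> simp [List.takeWhile_cons, h, pvNextSpace]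

-- mid-word continuation of pvWordsAux: first word is cur.reverse ++ leading non-space run
lemma wordsAux_cons (cs : List Char) : ∀ cur, cur ≠ [] →
    pvWordsAux cs cur =
      (cur.reverse ++ cs.takeWhile (fun c => !PySem.Chars.isspace c)) ::
        pvWordsAux (cs.dropWhile (fun c => !PySem.Chars.isspace c)) [] := by
  induction cs with
  | nil =>
    intro cur h
    simp [pvWordsAux, List.isEmpty_iff, h]
  | cons c cs ih =>
    intro cur h
    by_cases hs : PySem.Chars.isspace c
    · rw [pvWordsAux]
      simp only [hs, if_true, List.isEmpty_iff, h, if_neg h]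
      simp only [List.takeWhile_cons, List.dropWhile_cons, hs, Bool.not_true,
        Bool.false_eq_true, if_false]
      rw [pvWordsAux]
      simp [hs]
    · rw [pvWordsAux]
      simp only [hs, if_false, Bool.false_eq_true]
      rw [ih (c :: cur) (by simp)]
      simp [List.takeWhile_cons, List.dropWhile_cons, hs]

-- B's scan inside a word = pvLabW false on the word's remainder, then back to boundary state
lemma scan_false_eq (cs : List Char) :
    pvScan false cs =
      pvLabW false (cs.takeWhile (fun c => !PySem.Chars.isspace c)) ++
        pvScan true (cs.dropWhile (fun c => !PySem.Chars.isspace c)) := by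
  induction cs with
  | nil => simp [pvScan, pvLabW]
  | cons c cs ih =>
    by_cases hs : PySem.Chars.isspace c
    · simp [pvScan, hs, List.takeWhile_cons, List.dropWhile_cons, pvLabW]
    · rw [pvScan]
      simp only [hs, Bool.false_eq_true, if_false]
      rw [ih]
      simp [List.takeWhile_cons, List.dropWhile_cons, hs, pvLabW,
        takeWhile_isEmpty_eq_nextSpace]

-- main bridge: B's boundary scan = A's word list flat-mapped through pvLabW
lemma scan_true_eq (n : Nat) : ∀ cs : List Char, cs.length = n →
    pvScan true cs = (pvWordsAux cs []).flatMap (pvLabW true) := by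
  induction n using Nat.strong_induction_on with
  | _ n ih =>
    intro cs hn
    cases cs with
    | nil => simp [pvScan, pvWordsAux]
    | cons c cs =>
      have hn' : cs.length + 1 = n := by simpa using hn
      by_cases hs : PySem.Chars.isspace c
      · rw [pvScan, pvWordsAux]
        simp only [hs, if_true, List.isEmpty_nil]
        exact ih cs.length (by omega) cs rfl
      · rw [pvScan, pvWordsAux]
        simp only [hs, if_false, Bool.false_eq_true]
        rw [wordsAux_cons cs [c] (by simp)]
        rw [List.flatMap_cons]
        have hdw : (cs.dropWhile (fun c => !PySem.Chars.isspace c)).length ≤ cs.length :=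
          List.length_dropWhile_le _ _
        rw [ih (cs.dropWhile (fun c => !PySem.Chars.isspace c)).length (by omega) _ rfl |>.symm]
        rw [scan_false_eq]
        simp [pvLabW, takeWhile_isEmpty_eq_nextSpace]

def pvHead : List Char → Char
  | [] => ' '
  | c :: _ => c

-- B's foldl over the zipped lookahead = acc ++ pvScan prev
lemma fold_eq_scan (cs : List Char) : ∀ (acc : List (String × String)) (prev : Bool),
    ((cs.zip (cs.drop 1 ++ [' '])).foldl (fun st p =>
        if !(PySem.Chars.isspace p.1) then
          let next_space := PySem.Chars.isspace p.2
          let label := if st.2 then (if next_space then "S" else "B")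
                       else (if next_space then "E" else "M")
          (st.1 ++ [(String.ofList [p.1], label)], PySem.Chars.isspace p.1)
        else (st.1, PySem.Chars.isspace p.1)) (acc, prev)).1
      = acc ++ pvScan prev cs := by
  induction cs with
  | nil => simp [pvScan]
  | cons c cs ih =>
    intro acc prev
    have hz : (c :: cs).zip (((c :: cs).drop 1) ++ [' '])
        = (c, pvHead cs) :: cs.zip (cs.drop 1 ++ [' ']) := by
      cases cs <;> simp [pvHead]
    rw [hz, List.foldl_cons]
    have hns : PySem.Chars.isspace (pvHead cs) = pvNextSpace cs := by
      cases cs with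
      | nil => decide
      | cons h t => rfl
    by_cases hs : PySem.Chars.isspace c
    · simp only [hs, Bool.not_true, Bool.false_eq_true, if_false]
      rw [ih, pvScan]
      simp [hs]
    · simp only [hs, Bool.not_false, if_true]
      rw [ih, pvScan]
      simp [hs, hns, List.append_assoc]

-- per-sentence equality
lemma sentence_eq (s : String) :
    (PySem.Str.split₀ s).foldl (fun sentence_list word =>
        if PySem.Str.len word == 1 then
          sentence_list ++ [(word, "S")]
        else
          (PySem.List.enumerate word.toList).foldl (fun sl ic =>
            let label := if ic.1 == 0 then "B"
              else if ic.1 == PySem.Str.len word - 1 then "E"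
              else "M"
            sl ++ [(String.ofList [ic.2], label)]) sentence_list) []
      = (let cs := s.toList
         ((cs.zip (cs.drop 1 ++ [' '])).foldl (fun st p =>
            if !(PySem.Chars.isspace p.1) then
              let next_space := PySem.Chars.isspace p.2
              let label := if st.2 then (if next_space then "S" else "B")
                           else (if next_space then "E" else "M")
              (st.1 ++ [(String.ofList [p.1], label)], PySem.Chars.isspace p.1)
            else (st.1, PySem.Chars.isspace p.1)) (([] : List (String × String)), true)).1) := by
  rw [fold_eq_scan, List.nil_append,
    scan_true_eq s.toList.length s.toList rfl]
  have hsplit : PySem.Chars.split₀ s.toList = pvWordsAux s.toList [] := by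
    have := go_eq_wordsAux s.toList [] []
    simpa [PySem.Chars.split₀] using this
  calc
    (PySem.Str.split₀ s).foldl _ []
        = ((PySem.Str.split₀ s).map String.toList).flatMap (fun w =>
            (w.zip (pvBmes w.length)).map
              (fun p => (String.ofList [p.1], String.ofList [p.2]))) := by
          simp only [word_step]
          rw [PySem.List.foldl_append_eq_flatMap, List.nil_append, List.flatMap_map]
    _ = (pvWordsAux s.toList []).flatMap (pvLabW true) := by
          rw [PySem.Str.split₀_map_toList, hsplit]
          exact List.flatMap_congr (fun w _ => zip_eq_labW w)

-- ===== VERDICT (by name: the statement is the Claim_ definition above) =====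
theorem cws_transfer_to_trainable_spec : Claim_equal_cws_transfer_to_trainable := by
  intro raw_data_lines _
  unfold Spec_cws_transfer_to_trainable cws_transfer_to_trainable cws_transfer_to_trainable_alt
  simp only [sentence_eq]
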